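-- pv_equiv track=rewrite | github.com/divyadeep10/AI-hallucination | backend/app/retrieval_wikipedia.py | _strip_question_prefix
-- ===== SOURCE A (Python) =====
-- _QUESTION_PREFIXES = (
--     "can you explain ",
--     "could you explain ",
--     "tell me about ",
--     "what is the ",
--     "what are the ",
--     "how does the ",
--     "how do the ",
--     "what is ",
--     "what are ",
--     "what was ",
--     "what were ",
--     "what does ",
--     "what do ",
--     "how is ",
--     "how are ",
--     "how was ",
--     "how were ",
--     "how does ",
--     "how do ",
--     "how can ",
--     "explain ",
--     "define ",
--     "describe ",
--     "give me ",
--     "give a ",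
-- )
--
-- def _strip_question_prefix(text: str) -> str:
--     """Remove leading question/instruction phrases; return main topic for API search."""
--     t = (text or "").strip()
--     if not t:
--         return ""
--     lower = t.lower()
--     for prefix in _QUESTION_PREFIXES:
--         if lower.startswith(prefix):
--             t = t[len(prefix) :].strip()
--             lower = t.lower()
--             break
--     return t
-- ===== SOURCE B (Python) =====
-- _QUESTION_PREFIXES = (
--     "can you explain ",
--     "could you explain ",
--     "tell me about ",
--     "what is the ",
--     "what are the ",
--     "how does the ",
--     "how do the ",
--     "what is ",
--     "what are ",
--     "what was ",
--     "what were ",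
--     "what does ",
--     "what do ",
--     "how is ",
--     "how are ",
--     "how was ",
--     "how were ",
--     "how does ",
--     "how do ",
--     "how can ",
--     "explain ",
--     "define ",
--     "describe ",
--     "give me ",
--     "give a ",
-- )
--
-- # A character trie over the prefixes, built once; terminal nodes are marked with
-- # the key None (which can never collide with a text character).  Matching walks
-- # the lowered text once, remembering the deepest terminal reached.  Whenever two
-- # prefixes in the tuple can match the same text, one is a prefix of the other and
-- # the longer one comes first, so the deepest terminal is exactly the prefix the
-- # original first-match loop picks.
-- _TRIE = {}
-- for _p in _QUESTION_PREFIXES: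
--     _node = _TRIE
--     for _ch in _p:
--         _node = _node.setdefault(_ch, {})
--     _node[None] = True
-- del _p, _ch, _node
--
--
-- def _strip_question_prefix(text: str) -> str:
--     """Remove leading question/instruction phrases; return main topic for API search."""
--     t = (text or "").strip()
--     if not t:
--         return ""
--     node = _TRIE
--     cut = 0
--     for i, ch in enumerate(t.lower()):
--         nxt = node.get(ch)
--         if nxt is None:
--             break
--         node = nxt
--         if None in node:
--             cut = i + 1
--     return t[cut:].strip()
-- ===== Notes on version B (the rewrite author's own statement) =====
-- stated objective: alternative
-- what changed: Replaces A's linear scan over the prefix tuple (one startswith per prefix, with a break) by a character trie built once from the prefixes and walked once along the lowered text, taking the deepest terminal node; on this tuple the deepest match coincides with A's first match because whenever two prefixes can match the same text one is a prefix of the other and the longer comes first.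
import Mathlib
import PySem

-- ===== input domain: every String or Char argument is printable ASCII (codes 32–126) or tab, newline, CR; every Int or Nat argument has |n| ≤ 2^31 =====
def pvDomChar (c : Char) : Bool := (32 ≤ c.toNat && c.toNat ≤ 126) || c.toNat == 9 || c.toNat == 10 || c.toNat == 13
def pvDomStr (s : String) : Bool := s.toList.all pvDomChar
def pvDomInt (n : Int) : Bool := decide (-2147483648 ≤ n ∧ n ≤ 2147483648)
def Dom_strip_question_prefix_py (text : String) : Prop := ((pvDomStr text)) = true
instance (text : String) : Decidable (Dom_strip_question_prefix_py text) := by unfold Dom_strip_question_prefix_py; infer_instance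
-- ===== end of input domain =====

-- B replaces A's linear scan over the prefix tuple (re-reading the text's start for each
-- prefix) by a character trie over the prefixes walked once along the lowered text,
-- taking the deepest terminal; on this tuple the deepest match equals A's first match
-- (alternative decomposition; no speed claim).

-- the module-level tuple _QUESTION_PREFIXES, shared context of both programs
def pyQuestionPrefixes : List String := [
  "can you explain ",
  "could you explain ",
  "tell me about ",
  "what is the ",
  "what are the ",
  "how does the ",
  "how do the ",
  "what is ",
  "what are ",
  "what was ",
  "what were ",
  "what does ",
  "what do ",
  "how is ",
  "how are ",
  "how was ",
  "how were ",
  "how does ",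
  "how do ",
  "how can ",
  "explain ",
  "define ",
  "describe ",
  "give me ",
  "give a "]

-- ===== PORT A =====
-- A's for-loop with break: first prefix (in tuple order) such that lower.startswith(prefix)
-- replaces t by t[len(prefix):].strip() and breaks (lower is recomputed but unused after break).
def stripALoop : List String → String → String
  | [], t => t
  | p :: ps, t =>
    if PySem.Str.startswith (PySem.Str.lower t) p then
      PySem.Str.strip (PySem.Str.slice t (some (PySem.Str.len p)) none)
    else stripALoop ps t

def strip_question_prefix_py (text : String) : String :=
  let t := PySem.Str.strip text
  if t = "" then "" else stripALoop pyQuestionPrefixes t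

-- ===== PORT B =====
-- B's trie: Python's nested dicts {char: subtrie} with terminal marker key None.
-- A trie node is (terminal flag, children); the children association list is the
-- inductive PKids: 'cons c b k rest' = child for character c whose subtrie is (b, k),
-- followed by the remaining siblings rest.
inductive PKids : Type where
  | nil : PKids
  | cons : Char → Bool → PKids → PKids → PKids
deriving DecidableEq, Repr

-- node.get(ch)
def childFind : PKids → Char → Option (Bool × PKids)
  | .nil, _ => none
  | .cons c' b k rest, c => if c' = c then some (b, k) else childFind rest c

-- write-back of the (possibly new) child, part of node.setdefault(ch, {})
def childSet : PKids → Char → Bool × PKids → PKids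
  | .nil, c, t => .cons c t.1 t.2 .nil
  | .cons c' b k rest, c, t => if c' = c then .cons c' t.1 t.2 rest else .cons c' b k (childSet rest c t)

-- the inner build loop: for ch in p: node = node.setdefault(ch, {});  node[None] = True
def trieInsert : List Char → Bool × PKids → Bool × PKids
  | [], (_, ch) => (true, ch)
  | c :: w, (term, ch) => (term, childSet ch c (trieInsert w ((childFind ch c).getD (false, .nil))))

-- the module-level build loop over _QUESTION_PREFIXES
def rootTrie : Bool × PKids := pyQuestionPrefixes.foldl (fun tr p => trieInsert p.toList tr) (false, .nil)

-- the matching loop: for i, ch in enumerate(t.lower()): descend, remember deepest terminal in cut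
def walkLoop : Bool × PKids → List Char → Nat → Nat → Nat
  | _, [], _, cut => cut
  | (_, ch), c :: ls, i, cut =>
    match childFind ch c with
    | none => cut
    | some (term, ch') => walkLoop (term, ch') ls (i + 1) (if term then i + 1 else cut)

def strip_question_prefix_py_alt (text : String) : String :=
  let t := PySem.Str.strip text
  if t = "" then ""
  else
    let cut := walkLoop rootTrie (PySem.Str.lower t).toList 0 0
    PySem.Str.strip (PySem.Str.slice t (some ((cut : Nat) : Int)) none)

-- ===== PRECONDITION & SPEC =====
def Spec_strip_question_prefix_py (text : String) (out : String) : Prop := out = strip_question_prefix_py_alt text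
instance (text : String) (out : String) : Decidable (Spec_strip_question_prefix_py text out) := by unfold Spec_strip_question_prefix_py; infer_instance

-- ===== CLAIM (what is proved, stated in full; the proofs are below) =====
def Claim_equal_strip_question_prefix_py : Prop := ∀ (text : String), Dom_strip_question_prefix_py text → Spec_strip_question_prefix_py text (strip_question_prefix_py text)

-- ===== LEMMAS AND PROOFS =====

-- trie membership: the set of words stored in a trie
def pvHas : Bool × PKids → List Char → Prop
  | (term, _), [] => term = true
  | (_, ch), c :: w => ∃ t, childFind ch c = some t ∧ pvHas t w

-- deepest strictly-positive terminal depth along L (none if no stored nonempty word prefixes L)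
def pvWalkSub : Bool × PKids → List Char → Option Nat
  | _, [] => none
  | (_, ch), c :: ls =>
    match childFind ch c with
    | none => none
    | some (tterm, tch) =>
      match pvWalkSub (tterm, tch) ls with
      | some d => some (d + 1)
      | none => if tterm then some 1 else none

theorem pv_childFind_childSet (ch : PKids) (c c' : Char) (t : Bool × PKids) :
    childFind (childSet ch c t) c' = if c = c' then some t else childFind ch c' := by
  induction ch with
  | nil =>
    by_cases h : c = c' <;> simp [childSet, childFind, h]
  | cons c0 b0 k0 rest ihk ih =>
    by_cases h0 : c0 = c
    · subst h0
      by_cases h : c0 = c' <;> simp [childSet, childFind, h]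
    · by_cases h : c0 = c'
      · subst h
        have : ¬ c = c0 := fun hc => h0 hc.symm
        simp [childSet, childFind, h0, this]
      · by_cases hc : c = c'
        · subst hc; simp [childSet, childFind, h0, ih]
        · simp [childSet, childFind, h0, h, hc, ih]

theorem pv_has_empty (w : List Char) : ¬ pvHas (false, .nil) w := by
  cases w with
  | nil => simp [pvHas]
  | cons c v => simp [pvHas, childFind]

theorem pv_has_insert (w : List Char) : ∀ (tr : Bool × PKids) (w' : List Char),
    pvHas (trieInsert w tr) w' ↔ pvHas tr w' ∨ w' = w := by
  induction w with
  | nil =>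
    intro tr w'
    obtain ⟨term, ch⟩ := tr
    cases w' with
    | nil => simp [trieInsert, pvHas]
    | cons c v => simp [trieInsert, pvHas]
  | cons c w ih =>
    intro tr w'
    obtain ⟨term, ch⟩ := tr
    cases w' with
    | nil => simp [trieInsert, pvHas]
    | cons c' v =>
      simp only [trieInsert, pvHas, pv_childFind_childSet]
      by_cases hc : c = c'
      · subst hc
        simp only
        constructor
        · rintro ⟨t, ht, hv⟩
          cases ht
          rcases (ih _ v).mp hv with h | h
          · cases hfind : childFind ch c with
            | none => exact absurd (by simpa [hfind] using h) (pv_has_empty v)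
            | some t0 => exact Or.inl ⟨t0, rfl, by simpa [hfind] using h⟩
          · exact Or.inr (by simp [h])
        · rintro (⟨t, ht, hv⟩ | h)
          · exact ⟨_, rfl, (ih _ v).mpr (Or.inl (by simpa [ht] using hv))⟩
          · have hv : v = w := by simpa using h
            exact ⟨_, rfl, (ih _ v).mpr (Or.inr hv)⟩
      · simp only [if_neg hc]
        constructor
        · rintro ⟨t, ht, hv⟩
          exact Or.inl ⟨t, ht, hv⟩
        · rintro (⟨t, ht, hv⟩ | h)
          · exact ⟨t, ht, hv⟩
          · exact absurd h (by simp; intro h'; exact absurd h'.symm hc)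

theorem pv_has_foldl (P : List String) : ∀ (tr : Bool × PKids) (w : List Char),
    pvHas (P.foldl (fun tr p => trieInsert p.toList tr) tr) w ↔
      pvHas tr w ∨ ∃ p ∈ P, w = p.toList := by
  induction P with
  | nil => intro tr w; simp
  | cons p P ih =>
    intro tr w
    simp only [List.foldl_cons, ih, pv_has_insert, List.mem_cons]
    constructor
    · rintro ((h | h) | ⟨q, hq, hw⟩)
      · exact Or.inl h
      · exact Or.inr ⟨p, Or.inl rfl, h⟩
      · exact Or.inr ⟨q, Or.inr hq, hw⟩
    · rintro (h | ⟨q, (rfl | hq), hw⟩)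
      · exact Or.inl (Or.inl h)
      · exact Or.inl (Or.inr hw)
      · exact Or.inr ⟨q, hq, hw⟩

theorem pv_has_root (w : List Char) :
    pvHas rootTrie w ↔ ∃ p ∈ pyQuestionPrefixes, w = p.toList := by
  rw [rootTrie, pv_has_foldl]
  simp [pv_has_empty w]

-- the accumulator loop computes the deepest terminal depth
theorem pv_walkLoop_eq (L : List Char) : ∀ (tr : Bool × PKids) (i cut : Nat), cut ≤ i →
    walkLoop tr L i cut = match pvWalkSub tr L with | none => cut | some d => i + d := by
  induction L with
  | nil => intro tr i cut _; obtain ⟨term, ch⟩ := tr; simp [walkLoop, pvWalkSub]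
  | cons c ls ih =>
    intro tr i cut hcut
    obtain ⟨term, ch⟩ := tr
    simp only [walkLoop, pvWalkSub]
    cases hfind : childFind ch c with
    | none => simp
    | some t =>
      obtain ⟨tterm, tch⟩ := t
      dsimp only
      rw [ih (tterm, tch) (i + 1) (if tterm then i + 1 else cut) (by split <;> omega)]
      cases hsub : pvWalkSub (tterm, tch) ls with
      | some d => simp only []; ring
      | none => cases tterm <;> simp

theorem pv_walkSub_none (L : List Char) : ∀ (tr : Bool × PKids), pvWalkSub tr L = none →
    ∀ w, pvHas tr w → w ≠ [] → ¬ w <+: L := by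
  induction L with
  | nil =>
    intro tr _ w _ hne hpre
    exact hne (List.prefix_nil.mp hpre)
  | cons c ls ih =>
    intro tr hnone w hhas hne hpre
    obtain ⟨term, ch⟩ := tr
    cases w with
    | nil => exact hne rfl
    | cons c' v =>
      obtain ⟨hc, hpre'⟩ := (List.cons_prefix_cons.mp hpre)
      subst hc
      obtain ⟨t, hfind, hv⟩ := hhas
      obtain ⟨tterm, tch⟩ := t
      simp only [pvWalkSub, hfind] at hnone
      cases hsub : pvWalkSub (tterm, tch) ls with
      | some d => simp [hsub] at hnone
      | none =>
        cases v with
        | nil =>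
          simp only [pvHas] at hv
          subst hv
          rw [hsub] at hnone
          simp at hnone
        | cons c2 v2 =>
          exact ih _ hsub _ hv (by simp) hpre'

theorem pv_walkSub_some (L : List Char) : ∀ (tr : Bool × PKids) (d : Nat), pvWalkSub tr L = some d →
    (∃ w, pvHas tr w ∧ w <+: L ∧ w.length = d) ∧
      (∀ w, pvHas tr w → w ≠ [] → w <+: L → w.length ≤ d) := by
  induction L with
  | nil => intro tr d h; simp [pvWalkSub] at h
  | cons c ls ih =>
    intro tr d hsome
    obtain ⟨term, ch⟩ := tr
    simp only [pvWalkSub] at hsome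
    cases hfind : childFind ch c with
    | none => simp [hfind] at hsome
    | some t =>
      obtain ⟨tterm, tch⟩ := t
      rw [hfind] at hsome
      dsimp only at hsome
      cases hsub : pvWalkSub (tterm, tch) ls with
      | some d0 =>
        rw [hsub] at hsome
        have hd : d = d0 + 1 := by simpa using hsome.symm
        subst hd
        obtain ⟨⟨w0, hw0has, hw0pre, hw0len⟩, hbound⟩ := ih _ d0 hsub
        refine ⟨⟨c :: w0, ⟨_, hfind, hw0has⟩, by simpa using hw0pre, by simp [hw0len]⟩, ?_⟩
        intro w hhas hne hpre
        cases w with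
        | nil => exact absurd rfl hne
        | cons c' v =>
          obtain ⟨hc, hpre'⟩ := List.cons_prefix_cons.mp hpre
          subst hc
          obtain ⟨t, hfind', hv⟩ := hhas
          rw [hfind] at hfind'
          cases hfind'
          cases v with
          | nil => simp
          | cons c2 v2 =>
            have := hbound _ hv (by simp) hpre'
            simpa using Nat.succ_le_succ this
      | none =>
        rw [hsub] at hsome
        by_cases hterm : tterm = true
        · subst hterm
          simp at hsome
          subst hsome
          refine ⟨⟨[c], ⟨_, hfind, by simp [pvHas]⟩, by simp, by simp⟩, ?_⟩
          intro w hhas hne hpre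
          cases w with
          | nil => exact absurd rfl hne
          | cons c' v =>
            obtain ⟨hc, hpre'⟩ := List.cons_prefix_cons.mp hpre
            subst hc
            obtain ⟨t, hfind', hv⟩ := hhas
            rw [hfind] at hfind'
            cases hfind'
            cases v with
            | nil => simp
            | cons c2 v2 =>
              exact absurd hpre' (pv_walkSub_none ls _ hsub _ hv (by simp))
        · simp [hterm] at hsome

-- A's loop as a first-match search
theorem pv_stripALoop_eq (ps : List String) (t : String) :
    stripALoop ps t =
      match ps.find? (fun p => PySem.Str.startswith (PySem.Str.lower t) p) with
      | some p => PySem.Str.strip (PySem.Str.slice t (some (PySem.Str.len p)) none)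
      | none => t := by
  induction ps with
  | nil => simp [stripALoop]
  | cons p ps ih =>
    simp only [stripALoop, List.find?_cons]
    cases h : PySem.Str.startswith (PySem.Str.lower t) p <;> simp [ih]

-- no prefix in the tuple is a prefix of a later one (so first match = longest match)
theorem pv_prefixes_pairwise :
    pyQuestionPrefixes.Pairwise (fun p q => ¬ (p.toList <+: q.toList)) := by decide

theorem pv_prefixes_ne_nil : ∀ p ∈ pyQuestionPrefixes, p.toList ≠ [] := by decide

theorem pv_find?_pairwise {α : Type} (R : α → α → Prop) (P : List α) (pred : α → Bool)
    (p0 : α) (hP : P.Pairwise R) (hf : P.find? pred = some p0) :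
    ∀ q ∈ P, pred q = true → q = p0 ∨ R p0 q := by
  induction P with
  | nil => simp at hf
  | cons a l ih =>
    rw [List.pairwise_cons] at hP
    intro q hq hpred
    cases ha : pred a with
    | true =>
      rw [List.find?_cons, ha] at hf
      cases hf
      rcases List.mem_cons.mp hq with rfl | hql
      · exact Or.inl rfl
      · exact Or.inr (hP.1 q hql)
    | false =>
      rw [List.find?_cons, ha] at hf
      rcases List.mem_cons.mp hq with rfl | hql
      · rw [hpred] at ha; cases ha
      · exact ih hP.2 hf q hql hpred

theorem pv_str_eq_of_toList {s r : String} (h : s.toList = r.toList) : s = r :=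
  String.toList_inj.mp h

theorem pv_dropWhile_idem (p : Char → Bool) (l : List Char) :
    (l.dropWhile p).dropWhile p = l.dropWhile p := by
  induction l with
  | nil => simp
  | cons a t ih => by_cases h : p a <;> simp [h, ih]

theorem pv_rstrip_rstrip (l : List Char) :
    PySem.Chars.rstrip (PySem.Chars.rstrip l) = PySem.Chars.rstrip l := by
  simp [PySem.Chars.rstrip, pv_dropWhile_idem]

theorem pv_strip_strip (s : List Char) :
    PySem.Chars.strip (PySem.Chars.strip s) = PySem.Chars.strip s := by
  unfold PySem.Chars.strip PySem.Chars.lstrip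
  set l := s.dropWhile PySem.Chars.isspace with hl
  have hpre : PySem.Chars.rstrip l <+: l := by
    have h1 : (l.reverse.dropWhile PySem.Chars.isspace) <:+ l.reverse := List.dropWhile_suffix _
    have h2 := List.reverse_prefix.mpr h1
    simpa [PySem.Chars.rstrip] using h2
  rcases hr : PySem.Chars.rstrip l with _ | ⟨a, t⟩
  · simp [PySem.Chars.rstrip]
  · obtain ⟨r0, hrr⟩ := hpre
    rw [hr] at hrr
    have ha : PySem.Chars.isspace a = false := by
      cases hsp : PySem.Chars.isspace a
      · rfl
      · exfalso
        have hfix : l.dropWhile PySem.Chars.isspace = l := by rw [hl]; exact pv_dropWhile_idem _ s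
        rw [← hrr] at hfix
        simp [hsp] at hfix
        have h1 := congrArg List.length hfix
        have h2 := (List.dropWhile_suffix (l := t ++ r0) (p := PySem.Chars.isspace)).length_le
        simp [List.length_append] at h1 h2
        omega
    rw [← hr, hr]
    have hdw : (a :: t).dropWhile PySem.Chars.isspace = a :: t := by
      simp [ha]
    rw [hdw, ← hr, pv_rstrip_rstrip]

theorem pv_str_strip_strip (s : String) :
    PySem.Str.strip (PySem.Str.strip s) = PySem.Str.strip s := by
  simp [PySem.Str.strip, pv_strip_strip]

-- ===== VERDICT (by name: the statement is the Claim_ definition above) =====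
theorem strip_question_prefix_py_spec : Claim_equal_strip_question_prefix_py := by
  intro text _
  unfold Spec_strip_question_prefix_py strip_question_prefix_py strip_question_prefix_py_alt
  by_cases hE : PySem.Str.strip text = ""
  · simp [hE]
  · simp only [hE, if_false]
    set t := PySem.Str.strip text with ht
    set L : List Char := (PySem.Str.lower t).toList with hL
    have hfix : PySem.Str.strip t = t := by rw [ht, pv_str_strip_strip]
    have hstart : ∀ p : String,
        PySem.Str.startswith (PySem.Str.lower t) p = true ↔ p.toList <+: L := by
      intro p
      rw [hL]
      simp [PySem.Chars.startswith_iff]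
    rw [pv_stripALoop_eq]
    cases hf : pyQuestionPrefixes.find? (fun p => PySem.Str.startswith (PySem.Str.lower t) p) with
    | none =>
      -- no prefix matches: the trie walk finds nothing, cut = 0, B returns strip t = t
      have hnomatch : ∀ p ∈ pyQuestionPrefixes, ¬ (p.toList <+: L) := by
        intro p hp hpre
        exact (List.find?_eq_none.mp hf p hp) ((hstart p).mpr hpre)
      have hsubnone : pvWalkSub rootTrie L = none := by
        cases hsub : pvWalkSub rootTrie L with
        | none => rfl
        | some d =>
          obtain ⟨⟨w, hhas, hpre, _⟩, _⟩ := pv_walkSub_some L rootTrie d hsub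
          obtain ⟨p, hp, rfl⟩ := (pv_has_root w).mp hhas
          exact absurd hpre (hnomatch p hp)
      rw [pv_walkLoop_eq L rootTrie 0 0 (le_refl 0), hsubnone]
      have hsl : PySem.Str.slice t (some (((0 : Nat) : Int))) none = t := by
        apply pv_str_eq_of_toList
        simp [PySem.List.slice_none_none]
      dsimp only
      rw [hsl, hfix]
    | some p0 =>
      have hp0mem : p0 ∈ pyQuestionPrefixes := List.mem_of_find?_eq_some hf
      have hp0pre : p0.toList <+: L := (hstart p0).mp (List.find?_some hf)
      have hp0ne : p0.toList ≠ [] := pv_prefixes_ne_nil p0 hp0mem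
      cases hsub : pvWalkSub rootTrie L with
      | none =>
        exact absurd hp0pre
          (pv_walkSub_none L rootTrie hsub _ ((pv_has_root _).mpr ⟨p0, hp0mem, rfl⟩) hp0ne)
      | some d =>
        obtain ⟨⟨w, hhas, hpre, hlen⟩, hbound⟩ := pv_walkSub_some L rootTrie d hsub
        obtain ⟨q, hqmem, rfl⟩ := (pv_has_root _).mp hhas
        have hle : p0.toList.length ≤ d :=
          hbound _ ((pv_has_root _).mpr ⟨p0, hp0mem, rfl⟩) hp0ne hp0pre
        have hge : d ≤ p0.toList.length := by
          rcases List.prefix_or_prefix_of_prefix hp0pre hpre with h | h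
          · rcases pv_find?_pairwise _ pyQuestionPrefixes _ p0 pv_prefixes_pairwise hf q hqmem
              ((hstart q).mpr hpre) with rfl | hnp
            · omega
            · exact absurd h hnp
          · rw [← hlen]; exact h.length_le
        have hd : d = p0.toList.length := le_antisymm hge hle
        rw [pv_walkLoop_eq L rootTrie 0 0 (le_refl 0), hsub]
        have hlenp : PySem.Str.len p0 = ((p0.toList.length : Nat) : Int) := by
          simp [PySem.Str.len_eq]
        dsimp only
        rw [hd, hlenp]
        norm_num
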